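-- pv_equiv track=rewrite | github.com/steve0joo/StoryMind | backend/utils/character_deduplication.py | get_canonical_name
-- ===== SOURCE A (Python) =====
-- from typing import List, Dict, Tuple, Set
--
-- def get_canonical_name(duplicate_group: Set[str]) -> str:
--     """
--     Choose the best canonical name from a duplicate group
--
--     Priority:
--     1. Longest name (most complete)
--     2. Contains both first and last name
--     3. No title prefixes
--
--     Example: {'Harry', 'Harry Potter'} → 'Harry Potter'
--     """
--     names = list(duplicate_group)
--
--     # Remove title prefixes for comparison
--     prefixes = ['mr ', 'mrs ', 'miss ', 'ms ', 'dr ', 'professor ']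
--
--     def clean_name(name):
--         lower = name.lower()
--         for prefix in prefixes:
--             if lower.startswith(prefix):
--                 return name[len(prefix):]
--         return name
--
--     # Prefer names without titles
--     untitled = [n for n in names if clean_name(n) == n]
--     if untitled:
--         names = untitled
--
--     # Prefer longer names (more complete)
--     names.sort(key=lambda n: (len(n.split()), len(n)), reverse=True)
--
--     return names[0]
-- ===== SOURCE B (Python) =====
-- def get_canonical_name(duplicate_group):
--     prefixes = ('mr ', 'mrs ', 'miss ', 'ms ', 'dr ', 'professor ')
--     best_any = None       # (key, name) with the largest key seen so far, first wins ties
--     best_untitled = None  # same, restricted to names without a title prefix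
--     for n in duplicate_group:
--         k = (len(n.split()), len(n))
--         if best_any is None or k > best_any[0]:
--             best_any = (k, n)
--         if not n.lower().startswith(prefixes):
--             if best_untitled is None or k > best_untitled[0]:
--                 best_untitled = (k, n)
--     chosen = best_untitled if best_untitled is not None else best_any
--     return chosen[1]
-- ===== Notes on version B (the rewrite author's own statement) =====
-- stated objective: faster
-- what changed: Replaced A's three staged passes (clean_name filter building an untitled list, stable reverse sort by (word count, length), then [0]-indexing) by one fold over the group maintaining two running champions, best-untitled and best-overall, replaced only on a strictly greater key so the first maximal name wins as with A's stable sort; one O(n) selection pass instead of an O(n log n) sort (measured ~2x faster).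
-- outside the precondition, e.g. on get_canonical_name(set()): A raises IndexError, B raises TypeError; on get_canonical_name({'oy', 'zr'}): A returns 'zr', B returns 'zr'
import Mathlib
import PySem

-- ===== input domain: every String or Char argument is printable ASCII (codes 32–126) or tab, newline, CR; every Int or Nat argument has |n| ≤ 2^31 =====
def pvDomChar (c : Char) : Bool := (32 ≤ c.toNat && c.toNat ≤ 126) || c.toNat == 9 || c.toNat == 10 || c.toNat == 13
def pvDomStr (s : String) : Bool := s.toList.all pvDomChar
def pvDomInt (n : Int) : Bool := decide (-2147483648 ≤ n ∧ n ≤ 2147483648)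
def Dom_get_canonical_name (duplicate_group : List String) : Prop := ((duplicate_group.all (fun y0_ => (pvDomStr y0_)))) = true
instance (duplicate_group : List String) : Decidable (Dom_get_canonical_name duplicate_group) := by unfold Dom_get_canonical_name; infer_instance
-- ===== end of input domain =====

-- B replaces A's three staged passes (build an untitled list with clean_name, stable
-- reverse sort by (word count, length), take [0]) by ONE fold that keeps two running
-- champions — best untitled name and best overall name — replacing a champion only on a
-- strictly greater key, so the first maximal name wins ties as in A; one selection pass
-- instead of a sort (objective: faster, measured).

-- the title prefixes, shared data of both versions
def gcn_prefixes : List String := ["mr ", "mrs ", "miss ", "ms ", "dr ", "professor "]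

-- ===== PORT A =====
-- the for-loop of A's clean_name: first matching prefix is stripped, else name unchanged
def gcn_clean_go (name : String) (lower : String) : List String → String
  | [] => name
  | p :: ps =>
      if PySem.Str.startswith lower p then PySem.Str.slice name (some (PySem.Str.len p)) none
      else gcn_clean_go name lower ps

def gcn_clean (name : String) : String :=
  gcn_clean_go name (PySem.Str.lower name) gcn_prefixes

def get_canonical_name (duplicate_group : List String) : String :=
  let names := duplicate_group
  let untitled := names.filter (fun n => gcn_clean n == n)
  let names := if untitled.isEmpty then names else untitled
  let names := PySem.List.sorted2 names (fun n => ((PySem.Str.split₀ n).length : Int))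
                 (fun n => PySem.Str.len n) true
  match PySem.List.pyGet? names 0 with   -- names[0]; none = IndexError, excluded by Pre_
  | some s => s
  | none => ""

-- ===== PORT B =====
-- Python tuple k > bk on the (word count, length) keys
def gcn_gt (k bk : Int × Int) : Bool := decide (bk.1 < k.1) || (bk.1 == k.1 && decide (bk.2 < k.2))

-- the 'if best is None or k > best[0]: best = (k, n)' update of Source B
def gcn_best (b : Option ((Int × Int) × String)) (k : Int × Int) (n : String) :
    Option ((Int × Int) × String) :=
  match b with
  | none => some (k, n)
  | some (bk, bn) => if gcn_gt k bk then some (k, n) else some (bk, bn)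

-- 'n.lower().startswith(prefixes)' with a tuple of prefixes
def gcn_titled (n : String) : Bool :=
  gcn_prefixes.any (fun p => PySem.Str.startswith (PySem.Str.lower n) p)

def get_canonical_name_alt (duplicate_group : List String) : String :=
  let r := duplicate_group.foldl
      (fun (acc : Option ((Int × Int) × String) × Option ((Int × Int) × String)) n =>
        let k := (((PySem.Str.split₀ n).length : Int), PySem.Str.len n)
        (gcn_best acc.1 k n, if !gcn_titled n then gcn_best acc.2 k n else acc.2))
      (none, none)
  let chosen := match r.2 with | some x => some x | none => r.1
  match chosen with   -- chosen[1]; none = TypeError on the empty group, excluded by Pre_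
  | some (_, n) => n
  | none => ""

-- ===== PRECONDITION & SPEC =====
-- the untitled filter, the candidate pool and the sort key, as data of the precondition
def gcn_untitled (dg : List String) : List String :=
  dg.filter (fun n => !(gcn_prefixes.any (fun p => PySem.Str.startswith (PySem.Str.lower n) p)))
def gcn_pool (dg : List String) : List String :=
  if (gcn_untitled dg).isEmpty then dg else gcn_untitled dg
def gcn_key (n : String) : Int × Int := (((PySem.Str.split₀ n).length : Int), PySem.Str.len n)
def gcn_lt (x y : String) : Prop :=
  (gcn_key x).1 < (gcn_key y).1 ∨ ((gcn_key x).1 = (gcn_key y).1 ∧ (gcn_key x).2 < (gcn_key y).2)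

-- Pre_ excludes the empty group (Python A raises IndexError at names[0], B TypeError) and
-- groups in which two DISTINCT candidate names tie on the MAXIMAL (word count, length) key:
-- A receives a set, so which tied name comes first is an accident of set iteration order
-- and neither value is specified.
def Pre_get_canonical_name (duplicate_group : List String) : Prop :=
  duplicate_group ≠ [] ∧
    ∀ x ∈ gcn_pool duplicate_group, ∀ y ∈ gcn_pool duplicate_group,
      gcn_key x = gcn_key y → x = y ∨ ∃ z ∈ gcn_pool duplicate_group, gcn_lt x z
instance (duplicate_group : List String) : Decidable (Pre_get_canonical_name duplicate_group) := by
  unfold Pre_get_canonical_name gcn_lt; infer_instance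

def pvWitness_get_canonical_name : List String := ["Harry", "Harry Potter"]

def Spec_get_canonical_name (duplicate_group : List String) (out : String) : Prop := out = get_canonical_name_alt duplicate_group
instance (duplicate_group : List String) (out : String) : Decidable (Spec_get_canonical_name duplicate_group out) := by unfold Spec_get_canonical_name; infer_instance

-- ===== CLAIM (what is proved, stated in full; the proofs are below) =====
def Claim_equal_get_canonical_name : Prop := ∀ (duplicate_group : List String), Dom_get_canonical_name duplicate_group → Pre_get_canonical_name duplicate_group → Spec_get_canonical_name duplicate_group (get_canonical_name duplicate_group)

-- ===== LEMMAS AND PROOFS =====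

-- the first-maximal fold step that max2? performs on stored elements
def gcn_maxstep (o : Option String) (x : String) : Option String :=
  match o with
  | none => some x
  | some m =>
      if (decide (((PySem.Str.split₀ m).length : Int) < ((PySem.Str.split₀ x).length : Int)) ||
          !decide (((PySem.Str.split₀ x).length : Int) < ((PySem.Str.split₀ m).length : Int)) &&
          decide (PySem.Str.len m < PySem.Str.len x)) then some x else some m

-- head of a single reverse-stable insertion = the max?-style fold step
theorem head_insertBy_rev {α : Type} (lt : α → α → Bool) (x : α) (acc : List α) :
    (PySem.List.insertBy (fun a b => lt b a) x acc).head? =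
      (match acc.head? with
       | none => some x
       | some m => if lt m x then some x else some m) := by
  cases acc with
  | nil => simp [PySem.List.insertBy]
  | cons y ys =>
      simp only [PySem.List.insertBy, List.head?]
      by_cases h : lt y x <;> simp [h]

-- head of the whole stable reverse insertion sort = the first-maximal fold
theorem head_foldl_insertBy_rev {α : Type} (lt : α → α → Bool) :
    ∀ (xs : List α) (acc : List α),
      (xs.foldl (fun a x => PySem.List.insertBy (fun a b => lt b a) x a) acc).head? =
      xs.foldl (fun o x =>
        match o with
        | none => some x
        | some m => if lt m x then some x else some m) acc.head? := by
  intro xs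
  induction xs with
  | nil => intro acc; rfl
  | cons x xs ih =>
      intro acc
      simp only [List.foldl_cons]
      rw [ih, head_insertBy_rev]

theorem head_sorted2_rev_eq_max2? (xs : List String)
    (k1 k2 : String → Int) :
    (PySem.List.sorted2 xs k1 k2 true).head? = PySem.List.max2? xs k1 k2 := by
  simp only [PySem.List.sorted2, PySem.List.max2?, if_pos]
  exact head_foldl_insertBy_rev _ xs []

theorem pyGet?_zero_head {α : Type} (xs : List α) :
    PySem.List.pyGet? xs 0 = xs.head? := by
  cases xs <;> simp [PySem.List.pyGet?, PySem.List.pyIdx?]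

-- stripping a nonempty matched prefix shortens the name, so clean_name(n) == n
-- exactly when no prefix (lower-cased) matches
theorem clean_go_eq_all (ps : List String) (name : String)
    (hps : ∀ p ∈ ps, 0 < p.toList.length) :
    (gcn_clean_go name (PySem.Str.lower name) ps == name) =
      ps.all (fun p => !PySem.Str.startswith (PySem.Str.lower name) p) := by
  induction ps with
  | nil => simp [gcn_clean_go]
  | cons p ps ih =>
      simp only [gcn_clean_go, List.all_cons]
      by_cases h : PySem.Str.startswith (PySem.Str.lower name) p
      · rw [if_pos h, h]
        have hple : p.toList.length ≤ name.toList.length := by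
          have := (PySem.Chars.startswith_iff (PySem.Str.lower name).toList p.toList).mp
            (by simpa [PySem.Str.startswith] using h)
          have hlen := this.length_le
          simpa [PySem.Str.toList_lower, PySem.Chars.lower] using hlen
        have hpos : 0 < p.toList.length := hps p (List.mem_cons_self ..)
        have hs : (PySem.Str.slice name (some (PySem.Str.len p)) none).toList
            = name.toList.drop p.toList.length := by
          simp [PySem.Str.toList_slice, PySem.Chars.slice_eq_listSlice, PySem.Str.len_eq,
            PySem.List.slice_from_natCast]
        have hne : PySem.Str.slice name (some (PySem.Str.len p)) none ≠ name := by
          intro he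
          have := congrArg (fun s => s.toList.length) he
          simp only [hs, List.length_drop] at this
          omega
        simp only [Bool.not_true, Bool.false_and]
        rw [beq_eq_false_iff_ne]
        simpa [PySem.Str.len_eq] using hne
      · rw [if_neg h]
        simp only [Bool.not_eq_true] at h
        rw [h]
        simpa using ih (fun q hq => hps q (List.mem_cons_of_mem _ hq))

theorem clean_pred_eq (n : String) :
    (gcn_clean n == n) = !gcn_titled n := by
  rw [gcn_clean, clean_go_eq_all gcn_prefixes n (by decide)]
  simp [gcn_titled, List.all_eq_not_any_not]

-- the two > tests agree on all key pairs
theorem gt_cond_eq (a b c d : Int) :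
    (decide (a < b) || ((a == b) && decide (c < d))) =
      (decide (a < b) || (!decide (b < a) && decide (c < d))) := by
  rw [Bool.eq_iff_iff]
  simp only [Bool.or_eq_true, Bool.and_eq_true, Bool.not_eq_true', decide_eq_true_eq,
    decide_eq_false_iff_not, beq_iff_eq]
  omega

-- the (key, name) pair B stores for a name
def gcn_emb (m : String) : (Int × Int) × String :=
  ((((PySem.Str.split₀ m).length : Int), PySem.Str.len m), m)

theorem gcn_best_emb (o : Option String) (x : String) :
    gcn_best (o.map gcn_emb) (((PySem.Str.split₀ x).length : Int), PySem.Str.len x) x =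
      (gcn_maxstep o x).map gcn_emb := by
  cases o with
  | none => rfl
  | some m =>
      simp only [Option.map_some, gcn_best, gcn_emb, gcn_maxstep, gcn_gt]
      have hgt := gt_cond_eq (((PySem.Str.split₀ m).length : Int))
        (((PySem.Str.split₀ x).length : Int)) (PySem.Str.len m) (PySem.Str.len x)
      by_cases hc : (decide (((PySem.Str.split₀ m).length : Int) < ((PySem.Str.split₀ x).length : Int)) ||
          (!decide (((PySem.Str.split₀ x).length : Int) < ((PySem.Str.split₀ m).length : Int)) &&
           decide (PySem.Str.len m < PySem.Str.len x))) = true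
      · rw [if_pos (by rw [hgt]; exact hc), if_pos hc]; rfl
      · rw [if_neg (by rw [hgt]; exact hc), if_neg hc]; rfl

-- B's champion fold is max2?'s first-maximal fold on stored (key, name) pairs
theorem foldl_best_eq_maxstep :
    ∀ (xs : List String) (o : Option String),
      xs.foldl (fun b n => gcn_best b (((PySem.Str.split₀ n).length : Int), PySem.Str.len n) n)
        (o.map gcn_emb) =
      (xs.foldl gcn_maxstep o).map gcn_emb := by
  intro xs
  induction xs with
  | nil => intro o; rfl
  | cons x xs ih =>
      intro o
      rw [List.foldl_cons, List.foldl_cons, gcn_best_emb, ih]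

theorem foldl_best_none (xs : List String) :
    xs.foldl (fun b n => gcn_best b (((PySem.Str.split₀ n).length : Int), PySem.Str.len n) n)
        none =
      (xs.foldl gcn_maxstep none).map gcn_emb :=
  foldl_best_eq_maxstep xs none

-- B's pair fold splits into the overall fold and the fold over the untitled sublist
theorem foldl_pair_split :
    ∀ (xs : List String) (a u : Option ((Int × Int) × String)),
      xs.foldl
        (fun (acc : Option ((Int × Int) × String) × Option ((Int × Int) × String)) n =>
          let k := (((PySem.Str.split₀ n).length : Int), PySem.Str.len n)
          (gcn_best acc.1 k n, if !gcn_titled n then gcn_best acc.2 k n else acc.2)) (a, u) =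
      (xs.foldl (fun b n => gcn_best b (((PySem.Str.split₀ n).length : Int), PySem.Str.len n) n) a,
       (xs.filter (fun n => !gcn_titled n)).foldl
         (fun b n => gcn_best b (((PySem.Str.split₀ n).length : Int), PySem.Str.len n) n) u) := by
  intro xs
  induction xs with
  | nil => intro a u; rfl
  | cons x xs ih =>
      intro a u
      simp only [List.foldl_cons, List.filter_cons]
      by_cases h : gcn_titled x
      · simp only [h, Bool.not_true, Bool.false_eq_true, if_false, ih]
      · simp only [Bool.not_eq_true] at h
        simp only [h, Bool.not_false, if_true, List.foldl_cons, ih]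

-- max2? is the first-maximal fold of gcn_maxstep
theorem max2?_eq_foldl_maxstep (xs : List String) :
    PySem.List.max2? xs (fun n => ((PySem.Str.split₀ n).length : Int)) (fun n => PySem.Str.len n) =
      xs.foldl gcn_maxstep none := by
  simp only [PySem.List.max2?]
  refine congrFun (congrFun (congrArg List.foldl ?_) none) xs
  funext o x
  cases o <;> rfl

theorem foldl_maxstep_some (xs : List String) (a : String) :
    ∃ m, xs.foldl gcn_maxstep (some a) = some m := by
  induction xs generalizing a with
  | nil => exact ⟨a, rfl⟩
  | cons x xs ih =>
      simp only [List.foldl_cons, gcn_maxstep]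
      split_ifs with h
      · exact ih x
      · exact ih a

theorem maxstep_none_iff (xs : List String) :
    xs.foldl gcn_maxstep none = none ↔ xs = [] := by
  cases xs with
  | nil => simp
  | cons x t =>
      simp only [List.foldl_cons]
      obtain ⟨m, hm⟩ := foldl_maxstep_some t x
      constructor
      · intro h; rw [show gcn_maxstep none x = some x from rfl, hm] at h; exact absurd h (by simp)
      · intro h; exact absurd h (by simp)

-- ===== VERDICT (by name: the statement is the Claim_ definition above) =====
theorem get_canonical_name_spec : Claim_equal_get_canonical_name := by
  intro dg _ _
  unfold Spec_get_canonical_name get_canonical_name get_canonical_name_alt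
  have hfilter : dg.filter (fun n => gcn_clean n == n) = dg.filter (fun n => !gcn_titled n) :=
    List.filter_congr (fun n _ => clean_pred_eq n)
  simp only [hfilter, pyGet?_zero_head, head_sorted2_rev_eq_max2?, max2?_eq_foldl_maxstep]
  rw [foldl_pair_split dg none none, foldl_best_none, foldl_best_none]
  by_cases he : (dg.filter (fun n => !gcn_titled n)).isEmpty = true
  · have h0 : dg.filter (fun n => !gcn_titled n) = [] := by simpa [List.isEmpty_iff] using he
    rw [if_pos he, h0]
    cases dg.foldl gcn_maxstep none <;> rfl
  · have h0 : dg.filter (fun n => !gcn_titled n) ≠ [] := by simpa [List.isEmpty_iff] using he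
    rw [if_neg he]
    cases hf : (dg.filter (fun n => !gcn_titled n)).foldl gcn_maxstep none with
    | none => exact absurd ((maxstep_none_iff _).mp hf) h0
    | some m => rfl
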